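-- pv_equiv track=rewrite | github.com/a97100Uminho/ATP2022 | TPC6/TP6.py | distAno
-- ===== SOURCE A (Python) =====
-- def distAno (obras):
--     dict2 = {}
--     for _, _, ano, *_ in obras:
--         if ano in dict2.keys():
--             dict2[ano] = dict2[ano] + 1
--         else:
--             dict2[ano] = 1
--     return dict2
-- ===== SOURCE B (Python) =====
-- def distAno(obras):
--     years = [ano for _, _, ano, *_ in obras]
--     return {y: years.count(y) for y in dict.fromkeys(years)}
-- ===== Notes on version B (the rewrite author's own statement) =====
-- stated objective: idiomatic
-- what changed: B replaces the one-pass accumulate-in-dict loop by extracting all years first, then building the result with a dict comprehension that counts each distinct year by a separate full scan (dict.fromkeys for ordered dedup).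
import Mathlib
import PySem

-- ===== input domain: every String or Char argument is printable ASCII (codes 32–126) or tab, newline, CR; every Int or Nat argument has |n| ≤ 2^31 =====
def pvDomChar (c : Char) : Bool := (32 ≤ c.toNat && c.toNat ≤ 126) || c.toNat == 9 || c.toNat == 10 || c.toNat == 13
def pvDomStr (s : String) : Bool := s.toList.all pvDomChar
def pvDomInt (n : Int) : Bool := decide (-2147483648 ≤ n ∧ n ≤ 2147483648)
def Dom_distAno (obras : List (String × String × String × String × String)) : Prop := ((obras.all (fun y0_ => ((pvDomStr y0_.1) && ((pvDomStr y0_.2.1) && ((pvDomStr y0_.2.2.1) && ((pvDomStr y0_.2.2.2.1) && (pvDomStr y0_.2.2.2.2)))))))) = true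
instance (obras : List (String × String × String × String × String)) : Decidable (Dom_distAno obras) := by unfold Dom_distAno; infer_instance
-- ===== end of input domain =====

-- B: idiomatic dict-comprehension re-implementation — dedup the years then count each by a full scan.


-- ===== PORT A =====
-- for _, _, ano, *_ in obras: if ano in dict2.keys(): dict2[ano] += 1 else: dict2[ano] = 1
def distAno (obras : List (String × String × String × String × String)) : List (String × Int) :=
  (obras.foldl (fun (d : PySem.Dict String Int) t =>
      let ano := t.2.2.1
      if d.contains ano then d.insert ano (d.getD ano 0 + 1)
      else d.insert ano 1) PySem.Dict.empty).items

-- ===== PORT B =====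
-- years = [ano for ...]; {y: years.count(y) for y in dict.fromkeys(years)}
def distAno_alt (obras : List (String × String × String × String × String)) : List (String × Int) :=
  let years := obras.map (fun t => t.2.2.1)
  (PySem.List.dedup years).map (fun y => (y, (years.count y : Int)))

-- ===== PRECONDITION & SPEC =====
def Spec_distAno (obras : List (String × String × String × String × String)) (out : List (String × Int)) : Prop := out = distAno_alt obras
instance (obras : List (String × String × String × String × String)) (out : List (String × Int)) : Decidable (Spec_distAno obras out) := by unfold Spec_distAno; infer_instance

-- ===== CLAIM (what is proved, stated in full; the proofs are below) =====
def Claim_equal_distAno : Prop := ∀ (obras : List (String × String × String × String × String)), Dom_distAno obras → Spec_distAno obras (distAno obras)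

-- ===== LEMMAS AND PROOFS =====

lemma body_eq (d : PySem.Dict String Int) (ano : String) :
    (if d.contains ano then d.insert ano (d.getD ano 0 + 1) else d.insert ano 1)
      = d.insert ano (d.getD ano 0 + 1) := by
  split_ifs with h
  · rfl
  · rw [PySem.Dict.getD_of_not_contains (d := d) (k := ano) (d0 := 0) (by simpa using h)]; norm_num

lemma foldl_obras (obras : List (String × String × String × String × String))
    (d : PySem.Dict String Int) :
    obras.foldl (fun (d : PySem.Dict String Int) t =>
        let ano := t.2.2.1
        if d.contains ano then d.insert ano (d.getD ano 0 + 1)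
        else d.insert ano 1) d
      = (obras.map (fun t => t.2.2.1)).foldl
          (fun (d : PySem.Dict String Int) x => d.insert x (d.getD x 0 + 1)) d := by
  induction obras generalizing d with
  | nil => rfl
  | cons t ts ih =>
    simp only [List.foldl_cons, List.map_cons]
    rw [body_eq d t.2.2.1]
    exact ih _

-- ===== VERDICT (by name: the statement is the Claim_ definition above) =====
theorem distAno_spec : Claim_equal_distAno := by
  intro obras _
  unfold Spec_distAno distAno distAno_alt
  rw [foldl_obras, PySem.Dict.foldl_insert_getD_add_one_eq_counter,
    PySem.Dict.items_counter]
  simp only [PySem.List.dedup_eq_ofList]
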